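-- pv_equiv track=rewrite | github.com/g-d-l/project_euler | done/122.py | addition_chain
-- ===== SOURCE A (Python) =====
-- def addition_chain(n):
--
--     def backtrack(power, depth, cost, path):
--         if (power > n or depth > cost[power]):
--             pass
--         else:
--             cost[power] = depth;
--             path[depth] = power;
--             for i in range(depth, -1, -1):
--                 backtrack(power + path[i], depth + 1, cost, path);
--
--     cost = [x for x in range(n + 1)]
--     path = [0 for x in range(n + 1)]
--     backtrack(1, 1, cost, path)
--     return cost
-- ===== SOURCE B (Python) =====
-- def addition_chain(n):
--     # Iterative DFS with an explicit stack of (power, depth, prefix) frames,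
--     # where prefix is the chain built so far (a per-frame snapshot).
--     cost = list(range(n + 1))
--     stack = [(1, 1, [0])]
--     while stack:
--         power, depth, prefix = stack.pop()
--         if power > n or depth > cost[power]:
--             continue
--         cost[power] = depth
--         chain = prefix + [power]
--         for q in chain:
--             stack.append((power + q, depth + 1, chain))
--     return cost
-- ===== Notes on version B (the rewrite author's own statement) =====
-- stated objective: alternative
-- what changed: The recursive backtracking over a shared mutable path array is replaced by an iterative depth-first search driven by an explicit stack of (power, depth, chain-prefix) frames, each carrying its own chain snapshot; the same states are pruned against the same cost array, so the returned cost list is identical.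
import Mathlib
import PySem

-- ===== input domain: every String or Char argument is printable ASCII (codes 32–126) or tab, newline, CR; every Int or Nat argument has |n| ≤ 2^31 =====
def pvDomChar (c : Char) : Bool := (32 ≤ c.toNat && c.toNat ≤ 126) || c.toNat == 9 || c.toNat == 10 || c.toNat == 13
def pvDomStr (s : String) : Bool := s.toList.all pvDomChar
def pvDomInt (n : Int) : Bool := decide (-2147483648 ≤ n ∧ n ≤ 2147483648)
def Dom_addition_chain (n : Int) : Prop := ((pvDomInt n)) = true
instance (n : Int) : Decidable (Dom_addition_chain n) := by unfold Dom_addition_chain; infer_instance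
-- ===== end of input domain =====

-- B replaces A's recursive backtracking (shared mutable path array) by an iterative DFS over an
-- explicit stack of (power, depth, chain-prefix) frames; same returned cost list, proved by an
-- exact step-for-step simulation.  A mutates only lists it builds itself, so no caller-visible
-- side effect is lost.

-- ===== PORT A =====
-- Fuel bounding the number of recursive calls (Python's recursion always terminates: the call
-- tree of backtrack has depth ≤ n+2 and branching ≤ n+2, so (n+2)^(n+2) calls are never reached).
def pvFuel (n : Int) : Nat := (n.toNat + 2) ^ (n.toNat + 2)

-- backtrack(power, depth, cost, path): one fuel unit per call, the remaining fuel is threaded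
-- through and returned — exactly one unit per pop of the B-side machine.  A second, structural
-- fuel d bounds the recursion depth (each nested call decreases it by one); it is started at the
-- same value, and since the threaded fuel f ≤ d always, the d-cutoff is never the one that fires.
-- cost[power] / path[depth] are only touched under the guard, where 1 ≤ power ≤ n and
-- 1 ≤ depth ≤ n keep them in range, so the total forms pyGetD/pySetD are exact there.
-- The 'for i in range(depth, -1, -1)' loop is the foldl threading (fuel, cost, path).
def pvBackA (n : Int) : Nat → Nat → Int → Int → List Int → List Int → Nat × List Int × List Int
  | 0, _, _, _, cost, path => (0, cost, path)
  | _ + 1, 0, _, _, cost, path => (0, cost, path)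
  | d + 1, f + 1, power, depth, cost, path =>
    if power > n ∨ depth > PySem.List.pyGetD cost power 0 then (f, cost, path)
    else
      let cost' := PySem.List.pySetD cost power depth
      let path' := PySem.List.pySetD path depth power
      (PySem.List.pyRange depth (-1) (-1)).foldl
        (fun st i => pvBackA n d st.1 (power + PySem.List.pyGetD st.2.2 i 0) (depth + 1) st.2.1 st.2.2)
        (f, cost', path')

def addition_chain (n : Int) : List Int :=
  let cost := PySem.List.pyRange 0 (n + 1) 1                             -- [x for x in range(n + 1)]
  let path := (PySem.List.pyRange 0 (n + 1) 1).map (fun _ => (0 : Int))  -- [0 for x in range(n + 1)]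
  (pvBackA n (pvFuel n) (pvFuel n) 1 1 cost path).2.1

-- ===== PORT B =====
-- Stack machine of Source B: list head = top of the Python stack; one fuel unit per pop — the same
-- budget as A, since each pushed frame corresponds to exactly one backtrack call.
def pvRunB (n : Int) (f : Nat) (stack : List (Int × Int × List Int)) (cost : List Int) : List Int :=
  match f, stack with
  | 0, _ => cost
  | _ + 1, [] => cost
  | f' + 1, (power, depth, pfx) :: rest =>
    if power > n ∨ depth > PySem.List.pyGetD cost power 0 then pvRunB n f' rest cost
    else
      let cost' := PySem.List.pySetD cost power depth
      let chain := pfx ++ [power]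
      pvRunB n f' (chain.foldl (fun st q => (power + q, depth + 1, chain) :: st) rest) cost'

def addition_chain_alt (n : Int) : List Int :=
  let cost := PySem.List.pyRange 0 (n + 1) 1                             -- list(range(n + 1))
  pvRunB n (pvFuel n) [(1, 1, [0])] cost

-- ===== PRECONDITION & SPEC =====
def Spec_addition_chain (n : Int) (out : List Int) : Prop := out = addition_chain_alt n
instance (n : Int) (out : List Int) : Decidable (Spec_addition_chain n out) := by unfold Spec_addition_chain; infer_instance

-- ===== CLAIM (what is proved, stated in full; the proofs are below) =====
def Claim_equal_addition_chain : Prop := ∀ (n : Int), Dom_addition_chain n → Spec_addition_chain n (addition_chain n)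

-- ===== LEMMAS AND PROOFS =====

-- Invariant of the reachable states: both arrays have length n+1, cost[k] ≤ k, path entries ≥ 0.
def pvInv (n : Int) (cost path : List Int) : Prop :=
  cost.length = (n + 1).toNat ∧ path.length = (n + 1).toNat ∧
  (∀ (k : Nat) (h : k < cost.length), cost[k] ≤ (k : Int)) ∧ (∀ x ∈ path, 0 ≤ x)

theorem pvRunB_nil (n : Int) (f : Nat) (cost : List Int) : pvRunB n f [] cost = cost := by
  cases f <;> simp [pvRunB]

-- Pushing every element of chain onto the stack = the reversed mapped frames in front.
theorem pvPush_eq {α : Type} (g : Int → α) (chain : List Int) (rest : List α) :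
    chain.foldl (fun st q => g q :: st) rest = (chain.map g).reverse ++ rest := by
  induction chain generalizing rest with
  | nil => rfl
  | cons q qs ih => simp [List.foldl_cons, ih q :: rest]

-- The reversed frames built from chain are the frames A's countdown loop visits, in order.
theorem pvFrames_eq {α : Type} (g : Int → α) (chain : List Int) (depth : Int)
    (hd : 0 ≤ depth) (hl : chain.length = depth.toNat + 1) :
    (chain.map g).reverse
      = (PySem.List.pyRange depth (-1) (-1)).map (fun i => g (PySem.List.pyGetD chain i 0)) := by
  rw [PySem.List.pyRange_neg_one]
  apply List.ext_getElem
  · simp [hl]; omega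
  · intro k h1 h2
    simp only [List.getElem_reverse, List.getElem_map, List.getElem_range, List.length_map]
    have hk : k < depth.toNat + 1 := by
      simpa [hl] using h1
    have hget : PySem.List.pyGetD chain (depth - (k : Int)) 0 = chain[(depth - (k : Int)).toNat] :=
      PySem.List.pyGetD_eq_getElem chain 0 (by omega) (by rw [hl]; omega)
    rw [hget]
    have hidx : (depth - (k : Int)).toNat = chain.length - 1 - k := by omega
    exact (congrArg g (getElem_congr_idx hidx)).symm

-- pyGetD through a take-prefix.
theorem pvGetDTake (xs : List Int) (m : Nat) (i : Int) (h0 : 0 ≤ i) (h1 : i < (m : Int))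
    (h2 : m ≤ xs.length) :
    PySem.List.pyGetD (xs.take m) i 0 = PySem.List.pyGetD xs i 0 := by
  rw [PySem.List.pyGetD_eq_getElem (xs.take m) 0 h0 (by simp [List.length_take]; omega),
      PySem.List.pyGetD_eq_getElem xs 0 h0 (by omega)]
  exact List.getElem_take

-- take (d+1) after writing position d.
theorem pvTakeSetSucc (xs : List Int) (v : Int) (d : Nat) (h : d < xs.length) :
    (xs.set d v).take (d + 1) = xs.take d ++ [v] := by
  rw [List.set_eq_take_append_cons_drop, if_pos h, List.take_append]
  have hlt : (List.take d xs).length = d := by simp [List.length_take]; omega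
  rw [List.take_of_length_le (by omega), hlt]
  simp

-- A's countdown loop as a fold threading (fuel, cost, path) — the shape pvBackA unfolds to.
def pvFoldA (n : Int) (d : Nat) (power depth : Int) (is : List Int)
    (st : Nat × List Int × List Int) : Nat × List Int × List Int :=
  is.foldl (fun st i => pvBackA n d st.1 (power + PySem.List.pyGetD st.2.2 i 0) (depth + 1) st.2.1 st.2.2) st

-- One backtrack call of A = popping one frame of B's machine (plus invariant / prefix
-- preservation and the fact that the threaded fuel never grows).
def pvSimP (n : Int) (d : Nat) : Prop :=
  ∀ (f : Nat), f ≤ d →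
  ∀ (power depth : Int) (cost path : List Int) (rest : List (Int × Int × List Int)),
    pvInv n cost path → 1 ≤ power → 1 ≤ depth →
    pvRunB n f ((power, depth, path.take depth.toNat) :: rest) cost
        = pvRunB n (pvBackA n d f power depth cost path).1 rest (pvBackA n d f power depth cost path).2.1
      ∧ pvInv n (pvBackA n d f power depth cost path).2.1 (pvBackA n d f power depth cost path).2.2
      ∧ (pvBackA n d f power depth cost path).2.2.take depth.toNat = path.take depth.toNat
      ∧ (pvBackA n d f power depth cost path).1 ≤ f

theorem pvSimLoop (n : Int) (d : Nat) (IH : pvSimP n d) :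
    ∀ (is : List Int) (f : Nat), f ≤ d →
    ∀ (power depth : Int) (chain cost path : List Int) (rest : List (Int × Int × List Int)),
      pvInv n cost path → 1 ≤ power → 1 ≤ depth → depth ≤ n →
      chain = path.take (depth.toNat + 1) →
      (∀ i ∈ is, 0 ≤ i ∧ i ≤ depth) →
      pvRunB n f (is.map (fun i => (power + PySem.List.pyGetD chain i 0, depth + 1, chain)) ++ rest) cost
          = pvRunB n (pvFoldA n d power depth is (f, cost, path)).1 rest (pvFoldA n d power depth is (f, cost, path)).2.1
        ∧ pvInv n (pvFoldA n d power depth is (f, cost, path)).2.1 (pvFoldA n d power depth is (f, cost, path)).2.2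
        ∧ (pvFoldA n d power depth is (f, cost, path)).2.2.take (depth.toNat + 1) = path.take (depth.toNat + 1)
        ∧ (pvFoldA n d power depth is (f, cost, path)).1 ≤ f := by
  intro is
  induction is with
  | nil =>
    intro f hf power depth chain cost path rest hInv hp hd hdn hch his
    refine ⟨?_, ?_, ?_, ?_⟩
    · simp only [pvFoldA, List.foldl_nil, List.map_nil, List.nil_append]
    · simp only [pvFoldA, List.foldl_nil]; exact hInv
    · simp only [pvFoldA, List.foldl_nil]
    · exact Nat.le_refl f
  | cons i is' ih =>
    intro f hf power depth chain cost path rest hInv hp hd hdn hch his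
    obtain ⟨hi0, hid⟩ := his i (by simp)
    have hlen : path.length = (n + 1).toNat := hInv.2.1
    have htn : (depth + 1).toNat = depth.toNat + 1 := by omega
    have hgetchain : PySem.List.pyGetD chain i 0 = PySem.List.pyGetD path i 0 := by
      rw [hch]; exact pvGetDTake path (depth.toNat + 1) i hi0 (by omega) (by omega)
    have hq0 : 0 ≤ PySem.List.pyGetD path i 0 :=
      hInv.2.2.2 _ (PySem.List.pyGetD_mem path 0 (by simp [PySem.Raise.InRange]; omega))
    set r := pvBackA n d f (power + PySem.List.pyGetD path i 0) (depth + 1) cost path with hr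
    have hstep := IH f hf (power + PySem.List.pyGetD path i 0) (depth + 1) cost path
        ((is'.map (fun j => (power + PySem.List.pyGetD chain j 0, depth + 1, chain))) ++ rest)
        hInv (by omega) (by omega)
    obtain ⟨heq1, hInv1, hpres1, hfle1⟩ := hstep
    rw [htn] at hpres1
    have hch' : path.take ((depth + 1).toNat) = chain := by rw [hch, htn]
    rw [hch'] at heq1
    have hch2 : chain = r.2.2.take (depth.toNat + 1) := by rw [hch, ← hpres1]
    have htail := ih r.1 (le_trans hfle1 hf) power depth chain r.2.1 r.2.2 rest hInv1 hp hd hdn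
        hch2 (fun j hj => his j (by simp [hj]))
    obtain ⟨heq2, hInv2, hpres2, hfle2⟩ := htail
    have hunf : pvFoldA n d power depth (i :: is') (f, cost, path)
        = pvFoldA n d power depth is' r := by
      simp only [pvFoldA, List.foldl_cons]
      rw [← hr]
    refine ⟨?_, ?_, ?_, ?_⟩
    · rw [hunf]
      simp only [List.map_cons, List.cons_append]
      rw [hgetchain, heq1, heq2]
    · rw [hunf]; exact hInv2
    · rw [hunf]
      rw [hpres2]
      exact hpres1
    · rw [hunf]
      exact le_trans hfle2 (le_trans hfle1 (le_refl f))

theorem pvSimA (n : Int) : ∀ (d : Nat), pvSimP n d := by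
  intro d
  induction d with
  | zero =>
    intro f hf power depth cost path rest hInv hp hd
    have hf0 : f = 0 := Nat.le_zero.mp hf
    subst hf0
    have h0 : pvBackA n 0 0 power depth cost path = (0, cost, path) := by rw [pvBackA]
    refine ⟨?_, ?_, ?_, ?_⟩
    · rw [h0]; simp [pvRunB]
    · rw [h0]; exact hInv
    · rw [h0]
    · rw [h0]
  | succ d IHd =>
    intro f hf power depth cost path rest hInv hp hd
    cases f with
    | zero =>
      have h0 : pvBackA n (d + 1) 0 power depth cost path = (0, cost, path) := by rw [pvBackA]
      refine ⟨?_, ?_, ?_, ?_⟩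
      · rw [h0]; simp [pvRunB]
      · rw [h0]; exact hInv
      · rw [h0]
      · rw [h0]
    | succ f' =>
      have hf' : f' ≤ d := by omega
      by_cases hg : power > n ∨ depth > PySem.List.pyGetD cost power 0
      · have hA : pvBackA n (d + 1) (f' + 1) power depth cost path = (f', cost, path) := by
          rw [pvBackA]; rw [if_pos hg]
        refine ⟨?_, ?_, ?_, ?_⟩
        · rw [hA, pvRunB, if_pos hg]
        · rw [hA]; exact hInv
        · rw [hA]
        · rw [hA]; omega
      · push_neg at hg
        obtain ⟨hg1, hg2⟩ := hg
        obtain ⟨hcl, hpl, hcb, hpn⟩ := hInv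
        have hptn : power.toNat < cost.length := by omega
        have hgd : PySem.List.pyGetD cost power 0 = cost[power.toNat] :=
          PySem.List.pyGetD_eq_getElem cost 0 (by omega) (by omega)
        have hdp : depth ≤ power := by
          have hb := hcb power.toNat hptn
          rw [hgd] at hg2
          omega
        have hdl : depth.toNat < path.length := by omega
        set cost' := PySem.List.pySetD cost power depth with hc'
        set path' := PySem.List.pySetD path depth power with hp'
        have hcs : cost' = cost.set power.toNat depth :=
          PySem.List.pySetD_of_nonneg cost depth (by omega)
        have hps : path' = path.set depth.toNat power :=
          PySem.List.pySetD_of_nonneg path power (by omega)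
        have hInvSet : pvInv n (cost.set power.toNat depth) (path.set depth.toNat power) := by
          refine ⟨?_, ?_, ?_, ?_⟩
          · rw [List.length_set]; exact hcl
          · rw [List.length_set]; exact hpl
          · intro k hk
            rw [List.getElem_set]
            split
            · next heq => omega
            · exact hcb k (by simpa using hk)
          · intro x hx
            rw [List.mem_iff_getElem] at hx
            obtain ⟨j, hj, hxe⟩ := hx
            rw [List.getElem_set] at hxe
            split at hxe
            · omega
            · rw [← hxe]; exact hpn _ (List.getElem_mem _)
        have hInv' : pvInv n cost' path' := by rw [hcs, hps]; exact hInvSet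
        have hng : ¬ (power > n ∨ depth > PySem.List.pyGetD cost power 0) := by push_neg; exact ⟨hg1, hg2⟩
        have hA1 : pvBackA n (d + 1) (f' + 1) power depth cost path
            = pvFoldA n d power depth (PySem.List.pyRange depth (-1) (-1)) (f', cost', path') := by
          rw [pvBackA]; rw [if_neg hng]
          rfl
        have hchain : path.take depth.toNat ++ [power] = path'.take (depth.toNat + 1) := by
          rw [hps, pvTakeSetSucc path power depth.toNat hdl]
        have hchlen : (path.take depth.toNat ++ [power]).length = depth.toNat + 1 := by
          simp [List.length_take]; omega
        have hB : pvRunB n (f' + 1) ((power, depth, path.take depth.toNat) :: rest) cost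
            = pvRunB n f' (((path.take depth.toNat ++ [power]).map
                  (fun q => (power + q, depth + 1, path.take depth.toNat ++ [power]))).reverse ++ rest) cost' := by
          rw [pvRunB]; rw [if_neg hng]
          simp only [pvPush_eq]
          rfl
        have hfr := pvFrames_eq (fun q => (power + q, depth + 1, path.take depth.toNat ++ [power]))
            (path.take depth.toNat ++ [power]) depth (by omega) hchlen
        have hL := pvSimLoop n d IHd (PySem.List.pyRange depth (-1) (-1)) f' hf' power depth
            (path.take depth.toNat ++ [power]) cost' path' rest hInv' hp hd (le_trans hdp hg1)
            hchain (by
              intro j hj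
              rw [PySem.List.mem_pyRange_neg_one] at hj
              exact ⟨by omega, hj.2⟩)
        obtain ⟨heq, hInvL, hpresL, hfleL⟩ := hL
        refine ⟨?_, ?_, ?_, ?_⟩
        · rw [hB, hfr]
          rw [hA1]
          simpa using heq
        · rw [hA1]; exact hInvL
        · rw [hA1]
          have h1 := congrArg (List.take depth.toNat) hpresL
          rw [List.take_take, List.take_take] at h1
          have hmin : min depth.toNat (depth.toNat + 1) = depth.toNat := by omega
          rw [hmin] at h1
          rw [h1, hps]
          exact List.take_set_of_le (Nat.le_refl _)
        · rw [hA1]; omega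

-- ===== VERDICT (by name: the statement is the Claim_ definition above) =====
theorem addition_chain_spec : Claim_equal_addition_chain := by
  unfold Claim_equal_addition_chain
  intro n _
  unfold Spec_addition_chain
  set cost0 := PySem.List.pyRange 0 (n + 1) 1 with hc0
  set path0 := (PySem.List.pyRange 0 (n + 1) 1).map (fun _ => (0 : Int)) with hp0
  have eA : addition_chain n = (pvBackA n (pvFuel n) (pvFuel n) 1 1 cost0 path0).2.1 := rfl
  have eB : addition_chain_alt n = pvRunB n (pvFuel n) [(1, 1, [0])] cost0 := rfl
  by_cases hn : 0 ≤ n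
  · have hlen : cost0.length = (n + 1).toNat := by
      rw [hc0, PySem.List.length_pyRange_one]
      congr 1
      omega
    have hplen : path0.length = (n + 1).toNat := by
      rw [hp0, List.length_map]
      exact hlen
    have hInv : pvInv n cost0 path0 := by
      refine ⟨hlen, hplen, ?_, ?_⟩
      · intro k hk
        rw [getElem_congr_coll hc0, PySem.List.getElem_pyRange_one]
        omega
      · intro x hx
        rw [hp0] at hx
        simp only [List.mem_map] at hx
        obtain ⟨a, -, ha⟩ := hx
        omega
    have hone : path0.take (1 : Int).toNat = [0] := by
      have h1 : 1 ≤ path0.length := by omega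
      cases hpath : path0 with
      | nil => rw [hpath] at h1; simp at h1
      | cons x t =>
        have hx : x ∈ path0 := by rw [hpath]; simp
        rw [hp0] at hx
        simp only [List.mem_map] at hx
        obtain ⟨a, -, ha⟩ := hx
        simp [← ha]
    obtain ⟨heq, -, -, -⟩ := pvSimA n (pvFuel n) (pvFuel n) (le_refl _) 1 1 cost0 path0 [] hInv (le_refl 1) (le_refl 1)
    rw [pvRunB_nil] at heq
    rw [hone] at heq
    rw [eA, eB, ← heq]
  · obtain ⟨f', hf'⟩ : ∃ f', pvFuel n = f' + 1 := by
      have hpos : 0 < pvFuel n := by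
        unfold pvFuel
        positivity
      exact ⟨pvFuel n - 1, by omega⟩
    have hA2 : pvBackA n (f' + 1) (f' + 1) 1 1 cost0 path0 = (f', cost0, path0) := by
      rw [pvBackA]; rw [if_pos (Or.inl (by omega))]
    have hB2 : pvRunB n (f' + 1) [(1, 1, [0])] cost0 = pvRunB n f' [] cost0 := by
      rw [pvRunB]; rw [if_pos (Or.inl (by omega))]
    rw [eA, eB, hf', hB2, pvRunB_nil, hA2]
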